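-- pv_equiv track=rewrite | github.com/JAEKts/oasis | src/oasis/sequencer/analyzer.py | _tokens_to_bits
-- ===== SOURCE A (Python) =====
-- from typing import List, Dict, Any, Optional
--
-- def _tokens_to_bits(tokens: List[str]) -> List[int]:
--     """
--     Convert tokens to binary representation for statistical tests.
--
--     Args:
--         tokens: List of token strings
--
--     Returns:
--         List of binary values (0 or 1)
--     """
--     bits = []
--     for token in tokens:
--         # Convert each character to bits
--         for char in token:
--             byte_val = ord(char)
--             # Take lower 8 bits
--             for i in range(8):
--                 bits.append((byte_val >> i) & 1)
--     return bits
-- ===== SOURCE B (Python) =====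
-- # Closed-form index arithmetic: one flat pass over bit positions of the joined
-- # text; bit k of the output is bit (k & 7) of character (k >> 3).
-- def _tokens_to_bits(tokens):
--     text = "".join(tokens)
--     return [(ord(text[k >> 3]) >> (k & 7)) & 1 for k in range(8 * len(text))]
-- ===== Notes on version B (the rewrite author's own statement) =====
-- stated objective: alternative
-- what changed: Replaces the three nested append loops by joining all tokens into one string and a single closed-form comprehension over bit indices k in range(8*len(text)), where bit k is (ord(text[k>>3]) >> (k&7)) & 1.
import Mathlib
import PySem

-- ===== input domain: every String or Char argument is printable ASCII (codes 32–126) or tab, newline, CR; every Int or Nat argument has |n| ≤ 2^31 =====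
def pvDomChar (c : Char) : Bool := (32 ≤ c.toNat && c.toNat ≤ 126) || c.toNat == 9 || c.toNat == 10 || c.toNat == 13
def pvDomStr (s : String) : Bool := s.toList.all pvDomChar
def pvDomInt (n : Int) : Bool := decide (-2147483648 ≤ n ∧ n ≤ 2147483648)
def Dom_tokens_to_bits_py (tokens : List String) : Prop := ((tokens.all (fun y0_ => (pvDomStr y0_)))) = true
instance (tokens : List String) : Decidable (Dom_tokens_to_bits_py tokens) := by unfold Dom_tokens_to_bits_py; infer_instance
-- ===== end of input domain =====

-- B replaces A's three nested loops by a single closed-form pass over bit indices of the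
-- joined text: output bit k is bit (k & 7) of character (k >> 3). Alternative decomposition.

-- ===== PORT A =====
def tokens_to_bits_py (tokens : List String) : List Int :=
  tokens.foldl (fun bits token =>
    token.toList.foldl (fun bits char =>
      let byteVal : Int := (char.toNat : Int)
      -- for i in range(8): bits.append((byte_val >> i) & 1)
      (PySem.List.pyRange 0 8 1).foldl
        (fun bits i => bits ++ [PySem.Int.band (byteVal >>> i.toNat) 1]) bits)
      bits) []

-- ===== PORT B =====
-- text = "".join(tokens); [(ord(text[k >> 3]) >> (k & 7)) & 1 for k in range(8 * len(text))]
def tokens_to_bits_py_alt (tokens : List String) : List Int :=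
  let text : List Char := (PySem.Str.join "" tokens).toList
  (PySem.List.pyRange 0 (8 * (text.length : Int)) 1).map (fun (k : Int) =>
    -- text[k >> 3]: the index is always in range here, so the default is never used
    PySem.Int.band (((PySem.List.pyGetD text (k >>> (3 : Nat)) ' ').toNat : Int)
      >>> (PySem.Int.band k 7).toNat) 1)

-- ===== PRECONDITION & SPEC =====
def Spec_tokens_to_bits_py (tokens : List String) (out : List Int) : Prop := out = tokens_to_bits_py_alt tokens
instance (tokens : List String) (out : List Int) : Decidable (Spec_tokens_to_bits_py tokens out) := by unfold Spec_tokens_to_bits_py; infer_instance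

-- ===== CLAIM (what is proved, stated in full; the proofs are below) =====
def Claim_equal_tokens_to_bits_py : Prop := ∀ (tokens : List String), Dom_tokens_to_bits_py tokens → Spec_tokens_to_bits_py tokens (tokens_to_bits_py tokens)

-- ===== LEMMAS AND PROOFS =====

-- the 8 LSB-first bits of one character (the common normal form of both sides)
def pvRow (c : Char) : List Int :=
  (List.range 8).map (fun (j : Nat) => PySem.Int.band ((c.toNat : Int) >>> j) 1)

-- "".join(tokens) as a character list is the concatenation of the tokens' characters
lemma join_chars (tokens : List String) :
    (PySem.Str.join "" tokens).toList = tokens.flatMap String.toList := by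
  simp only [pysem, PySem.Chars.join, List.intercalate]
  induction tokens with
  | nil => rfl
  | cons t ts ih => cases ts <;> simp_all

-- A = per-character rows, flattened
lemma portA_eq (tokens : List String) :
    tokens_to_bits_py tokens = (tokens.flatMap String.toList).flatMap pvRow := by
  have hr : PySem.List.pyRange 0 8 1 = (List.range 8).map Nat.cast := by decide
  unfold tokens_to_bits_py
  simp only [PySem.List.foldl_append_singleton_eq_map, hr,
    PySem.List.foldl_append_eq_flatMap, List.map_map, List.nil_append,
    List.flatMap_assoc]
  congr 1

-- arithmetic core: the indexed comprehension over Nat indices equals the flattened rows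
lemma range_bits (text : List Char) :
    (List.range (8 * text.length)).map
      (fun m => PySem.Int.band (((text.getD (m / 8) ' ').toNat : Int) >>> (m % 8)) 1)
    = text.flatMap pvRow := by
  induction text using List.reverseRecOn with
  | nil => rfl
  | append_singleton ys c ih =>
    have hlen : 8 * (ys ++ [c]).length = 8 * ys.length + 8 := by simp; ring
    rw [hlen, List.range_add, List.map_append, List.map_map]
    have h1 : (List.range (8 * ys.length)).map
        (fun m => PySem.Int.band ((((ys ++ [c]).getD (m / 8) ' ').toNat : Int) >>> (m % 8)) 1)
      = (List.range (8 * ys.length)).map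
        (fun m => PySem.Int.band (((ys.getD (m / 8) ' ').toNat : Int) >>> (m % 8)) 1) := by
      apply List.map_congr_left
      intro m hm
      have hm' : m < 8 * ys.length := List.mem_range.mp hm
      have hidx : m / 8 < ys.length := Nat.div_lt_of_lt_mul (by omega)
      simp [List.getD, List.getElem?_append_left hidx]
    have h2 : (List.range 8).map
        ((fun m => PySem.Int.band ((((ys ++ [c]).getD (m / 8) ' ').toNat : Int) >>> (m % 8)) 1)
          ∘ (fun i => 8 * ys.length + i))
      = pvRow c := by
      simp only [pvRow]
      apply List.map_congr_left
      intro j hj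
      have hj' : j < 8 := List.mem_range.mp hj
      have hdiv : (8 * ys.length + j) / 8 = ys.length := by omega
      have hmod : (8 * ys.length + j) % 8 = j := by omega
      simp [Function.comp, hdiv, hmod, List.getD]
    rw [h1, h2, ih, List.flatMap_append]
    simp [pvRow]

-- B's comprehension over any character list equals the flattened rows
lemma portB_core (text : List Char) :
    (PySem.List.pyRange 0 (8 * (text.length : Int)) 1).map (fun (k : Int) =>
      PySem.Int.band (((PySem.List.pyGetD text (k >>> (3 : Nat)) ' ').toNat : Int)
        >>> (PySem.Int.band k 7).toNat) 1)
    = text.flatMap pvRow := by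
  have hcast : (8 * (text.length : Int)) = ((8 * text.length : Nat) : Int) := by push_cast; ring
  rw [hcast, PySem.List.pyRange_zero_natCast, List.map_map]
  rw [← range_bits text]
  apply List.map_congr_left
  intro m _
  have hsh : ((m : Int) >>> (3 : Nat)) = ((m >>> 3 : Nat) : Int) := by exact_mod_cast rfl
  have hband : PySem.Int.band (m : Int) 7 = ((m % 8 : Nat) : Int) := by
    have h := PySem.Int.band_natCast m 7
    norm_num at h
    rw [h]
    congr 1
    have := Nat.and_two_pow_sub_one_eq_mod m 3
    norm_num at this
    omega
  simp only [Function.comp, hsh, hband, Int.toNat_natCast, PySem.List.pyGetD_natCast,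
    Nat.shiftRight_eq_div_pow]

-- B = per-character rows, flattened
lemma portB_eq (tokens : List String) :
    tokens_to_bits_py_alt tokens = (tokens.flatMap String.toList).flatMap pvRow := by
  unfold tokens_to_bits_py_alt
  rw [join_chars]
  exact portB_core _

-- ===== VERDICT (by name: the statement is the Claim_ definition above) =====
theorem tokens_to_bits_py_spec : Claim_equal_tokens_to_bits_py := by
  intro tokens _
  unfold Spec_tokens_to_bits_py
  rw [portA_eq, portB_eq]
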